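-- pv_equiv track=rewrite | github.com/jmoggridge/bioinfo-notebooks | BA6_C - 2-break distance of P,Q.py | Breakpoint_graph
-- ===== SOURCE A (Python) =====
-- def Chromosome_to_Cycle(Chromosome):
--     # Turns chromosome into list of 2n nodes (direction implied by edge intergers diff =+/-1)
--     Nodes =[False for _ in range(len(Chromosome)*2)]
--     for j in range(1,len(Chromosome)+1):
--         if Chromosome[j-1] > 0:
--             Nodes[2*j-2] = 2*Chromosome[j-1] - 1
--             Nodes[2*j-1] = 2*Chromosome[j-1]
--         else:
--             Nodes[2*j-2] = -2*Chromosome[j-1]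
--             Nodes[2*j-1] = -2*Chromosome[j-1] - 1
--     return Nodes
--
-- def Colored_Edges(Chromosomes, colour):
--
--     col_edges = []
--     for chromosome in Chromosomes:
--         Nodes = Chromosome_to_Cycle(chromosome)
--         for i in range(1, len(Nodes)-1, 2):
--             col_edges.append((Nodes[i], Nodes[i+1], colour))
--         col_edges.append((Nodes[-1],Nodes[0], colour))
--     return col_edges
--
-- def Breakpoint_graph(genomes):
--
--     edges= []
--     colours = ['blue','red']
--     for genome in genomes:
--         edges += Colored_Edges(genome, colours.pop())
--     Adj = {}
--     for edge in edges:
--         if edge[0] not in Adj.keys():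
--             Adj[edge[0]] = [(edge[1], edge[2])]
--         else:
--             Adj[edge[0]].append((edge[1], edge[2]))
--         if edge[1] not in Adj.keys():
--             Adj[edge[1]] = [(edge[0],edge[2])]
--         else:
--             Adj[edge[1]].append((edge[0],edge[2]))
--     return Adj
-- ===== SOURCE B (Python) =====
-- def Breakpoint_graph(genomes):
--     # Group-by formulation: collect all colored edges (endpoints computed on the
--     # fly from the signed genes, cyclic wrap via modular indexing), then build the
--     # adjacency as, for each endpoint in first-appearance order, one scan of the
--     # edge list gathering its incident (other-end, colour) pairs — no dict is
--     # mutated while edges are produced.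
--     edges = []
--     for i, genome in enumerate(genomes):
--         colour = ('red', 'blue')[i]
--         for chrom in genome:
--             n = len(chrom)
--             for j in range(n):
--                 g, h = chrom[j], chrom[(j + 1) % n]
--                 u = 2 * g if g > 0 else -2 * g - 1          # out-endpoint of gene j
--                 v = 2 * h - 1 if h > 0 else -2 * h          # in-endpoint of gene j+1
--                 edges.append((u, v, colour))
--     keys = dict.fromkeys(k for u, v, _ in edges for k in (u, v))
--     return {k: [p for u, v, c in edges
--                   for p in (([(v, c)] if u == k else []) + ([(u, c)] if v == k else []))]
--             for k in keys}
-- ===== Notes on version B (the rewrite author's own statement) =====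
-- stated objective: alternative
-- what changed: B replaces A's incremental dict construction (per-edge membership test and in-place append) by a group-by: it first materialises the colored edge list (endpoints computed on the fly with cyclic modular indexing, no Nodes array), then emits the adjacency non-destructively as one comprehension per endpoint key in first-appearance order, each key gathering its incident pairs by a scan of the edge list.
import Mathlib
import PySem

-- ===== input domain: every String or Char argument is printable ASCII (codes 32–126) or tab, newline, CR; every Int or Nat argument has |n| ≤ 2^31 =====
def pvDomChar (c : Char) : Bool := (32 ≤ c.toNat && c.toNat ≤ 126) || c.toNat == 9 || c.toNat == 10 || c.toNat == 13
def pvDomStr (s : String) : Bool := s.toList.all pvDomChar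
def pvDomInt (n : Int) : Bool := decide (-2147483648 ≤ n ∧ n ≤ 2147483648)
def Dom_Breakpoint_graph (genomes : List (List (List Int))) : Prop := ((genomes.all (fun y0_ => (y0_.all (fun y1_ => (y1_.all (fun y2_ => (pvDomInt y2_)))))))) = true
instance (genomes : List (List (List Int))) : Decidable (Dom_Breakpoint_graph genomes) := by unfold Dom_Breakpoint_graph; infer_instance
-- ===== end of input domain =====

-- B builds the same adjacency by a group-by over a materialised edge list (one scan per
-- endpoint key) instead of A's incremental per-edge dict mutation; objective: alternative.


-- ===== PORT A =====
def Chromosome_to_Cycle (chromosome : List Int) : List Int :=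
  (PySem.List.pyRange 1 ((chromosome.length : Int) + 1) 1).foldl
    (fun nodes j =>
      let g := PySem.List.pyGetD chromosome (j - 1) 0
      if g > 0 then
        PySem.List.pySetD (PySem.List.pySetD nodes (2*j - 2) (2*g - 1)) (2*j - 1) (2*g)
      else
        PySem.List.pySetD (PySem.List.pySetD nodes (2*j - 2) (-2*g)) (2*j - 1) (-2*g - 1))
    (List.replicate (chromosome.length * 2) (0 : Int))   -- 'False' placeholders; every slot is overwritten

def Colored_Edges (chromosomes : List (List Int)) (colour : String) : List (Int × Int × String) :=
  chromosomes.foldl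
    (fun col_edges chromosome =>
      let nodes := Chromosome_to_Cycle chromosome
      let col_edges := (PySem.List.pyRange 1 ((nodes.length : Int) - 1) 2).foldl
        (fun acc i => acc ++ [(PySem.List.pyGetD nodes i 0, PySem.List.pyGetD nodes (i + 1) 0, colour)])
        col_edges
      -- Nodes[-1] raises IndexError on an empty chromosome: outside Pre_ (default 0 is never used inside Pre_)
      col_edges ++ [(PySem.List.pyGetD nodes (-1) 0, PySem.List.pyGetD nodes 0 0, colour)])
    []

def Breakpoint_graph (genomes : List (List (List Int))) : List (Int × List (Int × String)) :=
  let st := genomes.foldl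
    (fun (st : List (Int × Int × String) × List String) genome =>
      -- colours.pop(): last element; pop from an empty list raises IndexError (outside Pre_)
      (st.1 ++ Colored_Edges genome (PySem.List.pyGetD st.2 (-1) ""), st.2.dropLast))
    ([], ["blue", "red"])
  let adj := st.1.foldl
    (fun (adj : PySem.Dict Int (List (Int × String))) edge =>
      let adj :=
        match adj.get? edge.1 with
        | none => adj.insert edge.1 [(edge.2.1, edge.2.2)]
        | some l => adj.insert edge.1 (l ++ [(edge.2.1, edge.2.2)])
      match adj.get? edge.2.1 with
      | none => adj.insert edge.2.1 [(edge.1, edge.2.2)]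
      | some l => adj.insert edge.2.1 (l ++ [(edge.1, edge.2.2)]))
    PySem.Dict.empty
  adj.items

-- ===== PORT B =====
def Breakpoint_graph_alt (genomes : List (List (List Int))) : List (Int × List (Int × String)) :=
  -- edges: endpoints on the fly, cyclic wrap via (j + 1) % n  (indices are always in range)
  let edges := (PySem.List.enumerate genomes 0).foldl
    (fun acc ig =>
      -- ('red', 'blue')[i] raises IndexError past the second genome (outside Pre_)
      let colour := PySem.List.pyGetD ["red", "blue"] ig.1 ""
      ig.2.foldl
        (fun acc chrom =>
          acc ++ (List.range chrom.length).map (fun j =>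
            let g := chrom.getD j 0
            let h := chrom.getD ((j + 1) % chrom.length) 0
            ((if g > 0 then 2*g else -2*g - 1), (if h > 0 then 2*h - 1 else -2*h), colour)))
        acc)
    []
  -- dict.fromkeys(...) = ordered dedup of the endpoint stream
  let keys := PySem.Set.ofList (edges.flatMap (fun e => [e.1, e.2.1]))
  -- group-by: one scan of the edge list per key
  keys.map (fun k => (k, edges.flatMap (fun e =>
    (if e.1 == k then [(e.2.1, e.2.2)] else []) ++ (if e.2.1 == k then [(e.1, e.2.2)] else []))))

-- ===== PRECONDITION & SPEC =====
-- Pre_ excludes inputs on which the Python A RAISES: more than two genomes (pop from the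
-- exhausted two-colour list) and any empty chromosome (Nodes[-1] on the empty Nodes list).
def Pre_Breakpoint_graph (genomes : List (List (List Int))) : Prop :=
  genomes.length ≤ 2 ∧ ∀ g ∈ genomes, ∀ c ∈ g, c ≠ []
instance (genomes : List (List (List Int))) : Decidable (Pre_Breakpoint_graph genomes) := by
  unfold Pre_Breakpoint_graph; infer_instance

def pvWitness_Breakpoint_graph : List (List (List Int)) := [[[1, -2, 3]], [[3, 1], [-2]]]

def Spec_Breakpoint_graph (genomes : List (List (List Int))) (out : List (Int × List (Int × String))) : Prop := out = Breakpoint_graph_alt genomes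
instance (genomes : List (List (List Int))) (out : List (Int × List (Int × String))) : Decidable (Spec_Breakpoint_graph genomes out) := by unfold Spec_Breakpoint_graph; infer_instance

-- ===== CLAIM (what is proved, stated in full; the proofs are below) =====
def Claim_equal_Breakpoint_graph : Prop := ∀ (genomes : List (List (List Int))), Dom_Breakpoint_graph genomes → Pre_Breakpoint_graph genomes → Spec_Breakpoint_graph genomes (Breakpoint_graph genomes)

-- ===== LEMMAS AND PROOFS =====

def pvEnds (g : Int) : Int × Int := if g > 0 then (2*g - 1, 2*g) else (-2*g, -2*g - 1)

lemma ends_fst (g : Int) : (pvEnds g).1 = if g > 0 then 2*g - 1 else -2*g := by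
  unfold pvEnds; split <;> rfl

lemma ends_snd (g : Int) : (pvEnds g).2 = if g > 0 then 2*g else -2*g - 1 := by
  unfold pvEnds; split <;> rfl

-- the triples one chromosome contributes, in B's form (cyclic modular indexing)
def pvChromEdges (c : List Int) (colour : String) : List (Int × Int × String) :=
  (List.range c.length).map (fun j =>
    ((pvEnds (c.getD j 0)).2, (pvEnds (c.getD ((j + 1) % c.length) 0)).1, colour))

def pvIdx (es : List (Int × Int)) (k : Nat) : Int × Int := es.getD k (0, 0)
def pvFlat (es : List (Int × Int)) : List Int := es.flatMap (fun p => [p.1, p.2])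

lemma pvIdx_map (c : List Int) (j : Nat) (h : j < c.length) :
    pvIdx (c.map pvEnds) j = pvEnds (c.getD j 0) := by
  rw [pvIdx, List.getD_eq_getElem?_getD, List.getD_eq_getElem?_getD,
    List.getElem?_map, List.getElem?_eq_getElem h]
  rfl

lemma flat_length (es : List (Int × Int)) : (pvFlat es).length = 2 * es.length := by
  induction es with
  | nil => rfl
  | cons e es ih => simp [pvFlat] at ih ⊢; omega

lemma flat_getD1 (es : List (Int × Int)) : ∀ k, k < es.length →
    (pvFlat es).getD (2*k) 0 = (pvIdx es k).1 := by
  induction es with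
  | nil => intro k hk; simp at hk
  | cons e es ih =>
      intro k hk
      cases k with
      | zero => simp [pvFlat, pvIdx]
      | succ k =>
          have : 2 * (k+1) = (2*k) + 1 + 1 := by omega
          simp only [pvFlat, List.flatMap_cons, this, List.cons_append, List.nil_append,
            List.getD_cons_succ, pvIdx, List.getD_cons_succ]
          exact ih k (by simpa using hk)

lemma flat_getD2 (es : List (Int × Int)) : ∀ k, k < es.length →
    (pvFlat es).getD (2*k+1) 0 = (pvIdx es k).2 := by
  induction es with
  | nil => intro k hk; simp at hk
  | cons e es ih =>
      intro k hk
      cases k with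
      | zero => simp [pvFlat, pvIdx]
      | succ k =>
          have : 2 * (k+1) + 1 = (2*k+1) + 1 + 1 := by omega
          simp only [pvFlat, List.flatMap_cons, this, List.cons_append, List.nil_append,
            List.getD_cons_succ, pvIdx, List.getD_cons_succ]
          exact ih k (by simpa using hk)

lemma cycle_aux (c₀ : List Int) (c : List Int) :
  ∀ (s : Nat) (P L : List Int), c₀.drop s = c → P.length = 2*s → L.length = 2*c.length →
    (PySem.List.pyRange ((s:Int)+1) ((c₀.length:Int)+1) 1).foldl
      (fun nodes j =>
        let g := PySem.List.pyGetD c₀ (j - 1) 0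
        if g > 0 then
          PySem.List.pySetD (PySem.List.pySetD nodes (2*j - 2) (2*g - 1)) (2*j - 1) (2*g)
        else
          PySem.List.pySetD (PySem.List.pySetD nodes (2*j - 2) (-2*g)) (2*j - 1) (-2*g - 1))
      (P ++ L)
      = P ++ (c.map pvEnds).flatMap (fun p => [p.1, p.2]) := by
  induction c with
  | nil =>
      intro s P L hdrop hP hL
      have hlen : c₀.length ≤ s := List.drop_eq_nil_iff.mp hdrop
      have hLnil : L = [] := List.eq_nil_of_length_eq_zero (by simpa using hL)
      rw [PySem.List.pyRange_one_eq_nil (by omega)]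
      simp [hLnil]
  | cons g c' IH =>
      intro s P L hdrop hP hL
      have hs : s < c₀.length := by
        by_contra h
        rw [List.drop_eq_nil_iff.mpr (by omega)] at hdrop
        exact List.cons_ne_nil _ _ hdrop.symm
      have hg0 : c₀[s]? = some g := by
        have h0 := List.getElem?_drop (xs := c₀) (i := s) (j := 0)
        rw [hdrop] at h0
        simpa using h0.symm
      have hdrop' : c₀.drop (s+1) = c' := by
        have : c₀.drop (s+1) = (c₀.drop s).drop 1 := by
          rw [List.drop_drop]
        rw [this, hdrop, List.drop_one, List.tail_cons]
      obtain ⟨a, b, L', rfl⟩ : ∃ a b L', L = a :: b :: L' := by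
        match L, hL with
        | a :: b :: L', _ => exact ⟨a, b, L', rfl⟩
      rw [PySem.List.pyRange_one_cons (by omega)]
      simp only [List.foldl_cons]
      have e1 : ((s:Int) + 1 - 1) = ((s:Nat) : Int) := by omega
      have e2 : (2*((s:Int)+1) - 2) = (((2*s : Nat) : Int)) := by omega
      have e3 : (2*((s:Int)+1) - 1) = (((2*s+1 : Nat) : Int)) := by omega
      have hget : PySem.List.pyGetD c₀ ((s:Int) + 1 - 1) 0 = g := by
        rw [e1, PySem.List.pyGetD_natCast, List.getD_eq_getElem?_getD, hg0]; rfl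
      have hrest :
          ∀ v w : Int,
            PySem.List.pySetD (PySem.List.pySetD (P ++ a :: b :: L') (2*((s:Int)+1) - 2) v)
              (2*((s:Int)+1) - 1) w = (P ++ [v, w]) ++ L' := by
        intro v w
        rw [e2, e3, PySem.List.pySetD_natCast, PySem.List.pySetD_natCast]
        simp only [List.set_append, hP]
        rw [if_neg (by omega), Nat.sub_self]
        rw [List.set_append]
        simp only [hP]
        rw [if_neg (by omega)]
        have h2 : 2*s + 1 - (2*s) = 1 := by omega
        rw [h2]
        simp
      have ecast : ((s:Int) + 1 + 1) = (((s+1 : Nat) : Int)) + 1 := by push_cast; ring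
      have hL' : L'.length = 2 * c'.length := by simp at hL; omega
      simp only [hget]
      split_ifs with hg
      · rw [hrest (2*g - 1) (2*g), ecast,
          IH (s+1) (P ++ [2*g - 1, 2*g]) L' hdrop' (by simp [hP]; omega) hL']
        simp [pvEnds, hg]
      · rw [hrest (-2*g) (-2*g - 1), ecast,
          IH (s+1) (P ++ [-2*g, -2*g - 1]) L' hdrop' (by simp [hP]; omega) hL']
        simp [pvEnds, hg]

lemma cycle_eq (c : List Int) :
    Chromosome_to_Cycle c = pvFlat (c.map pvEnds) := by
  have h := cycle_aux c c 0 [] (List.replicate (c.length * 2) (0 : Int)) (by simp)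
    (by simp) (by simp; omega)
  simpa [Chromosome_to_Cycle, pvFlat] using h

-- B's modular-index form, split into the straight pairs and the wrap-around pair
lemma chromEdges_split (c : List Int) (hc : c ≠ []) (colour : String) :
    pvChromEdges c colour
      = (List.range (c.length - 1)).map
          (fun k => ((pvIdx (c.map pvEnds) k).2, (pvIdx (c.map pvEnds) (k+1)).1, colour))
        ++ [((pvIdx (c.map pvEnds) (c.length - 1)).2, (pvIdx (c.map pvEnds) 0).1, colour)] := by
  have hn : 0 < c.length := List.length_pos_of_ne_nil hc
  rw [pvChromEdges, show c.length = (c.length - 1) + 1 from by omega, List.range_succ,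
    List.map_append, List.map_cons, List.map_nil]
  simp only [Nat.add_sub_cancel]
  refine congrArg₂ (· ++ ·) ?_ ?_
  · apply List.map_congr_left
    intro j hj
    have hj' : j < c.length - 1 := List.mem_range.mp hj
    rw [Nat.mod_eq_of_lt (by omega), pvIdx_map c j (by omega), pvIdx_map c (j+1) (by omega)]
  · rw [show (c.length - 1 + 1) % ((c.length - 1) + 1) = 0 from Nat.mod_self _,
      pvIdx_map c (c.length - 1) (by omega), pvIdx_map c 0 (by omega)]

lemma colored_edges_body (c : List Int) (hc : c ≠ []) (colour : String)
    (acc : List (Int × Int × String)) :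
    (let nodes := Chromosome_to_Cycle c
     ((PySem.List.pyRange 1 ((nodes.length : Int) - 1) 2).foldl
        (fun a i => a ++ [(PySem.List.pyGetD nodes i 0, PySem.List.pyGetD nodes (i + 1) 0, colour)])
        acc)
      ++ [(PySem.List.pyGetD nodes (-1) 0, PySem.List.pyGetD nodes 0 0, colour)])
    = acc ++ pvChromEdges c colour := by
  have hm : 0 < (c.map pvEnds).length := by
    simpa using List.length_pos_of_ne_nil hc
  set es := c.map pvEnds with hes
  set m := es.length with hmdef
  have hlen : (pvFlat es).length = 2 * m := flat_length es
  have hne : pvFlat es ≠ [] := by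
    intro h0
    rw [h0] at hlen
    simp at hlen
    omega
  simp only [cycle_eq, ← hes]
  rw [PySem.List.foldl_append_singleton_eq_map]
  rw [PySem.List.pyRange_of_pos 1 (((pvFlat es).length : Int) - 1) (by norm_num)]
  have hcount :
      (if (1:Int) < ((pvFlat es).length : Int) - 1
        then ((((pvFlat es).length : Int) - 1 - 1 + 2 - 1) / 2).toNat else 0) = m - 1 := by
    rw [hlen]; push_cast; split_ifs with h <;> omega
  rw [hcount, List.map_map]
  have hmap :
      (List.range (m - 1)).map
          ((fun i => (PySem.List.pyGetD (pvFlat es) i 0,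
              PySem.List.pyGetD (pvFlat es) (i + 1) 0, colour)) ∘ fun (k : Nat) => 1 + 2 * (k : Int))
        = (List.range (m - 1)).map
            (fun k => ((pvIdx es k).2, (pvIdx es (k + 1)).1, colour)) := by
    apply List.map_congr_left
    intro k hk
    have hk' : k < m - 1 := List.mem_range.mp hk
    have e1 : (1 + 2 * (k : Int)) = ((2 * k + 1 : Nat) : Int) := by push_cast; ring
    have e2 : ((2 * k + 1 : Nat) : Int) + 1 = ((2 * (k + 1) : Nat) : Int) := by push_cast; ring
    simp only [Function.comp, e1, e2, PySem.List.pyGetD_natCast]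
    rw [flat_getD2 es k (by omega), flat_getD1 es (k + 1) (by omega)]
  have hlast : PySem.List.pyGetD (pvFlat es) (-1) 0 = (pvIdx es (m - 1)).2 := by
    rw [PySem.List.pyGetD_neg_one (pvFlat es) 0 hne]
    rw [← flat_getD2 es (m - 1) (by omega)]
    rw [List.getLast_eq_getElem, List.getD_eq_getElem?_getD,
      List.getElem?_eq_getElem (by omega)]
    have hidx : (pvFlat es).length - 1 = 2 * (m - 1) + 1 := by omega
    simp only [hidx, Option.getD_some]
  have hfirst : PySem.List.pyGetD (pvFlat es) 0 0 = (pvIdx es 0).1 := by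
    rw [PySem.List.pyGetD_zero]
    simpa using flat_getD1 es 0 (by omega)
  rw [hmap, hlast, hfirst, chromEdges_split c hc colour, ← hes]
  have hmc : m = c.length := by rw [hmdef, hes]; simp
  rw [hmc]
  simp [List.append_assoc]

lemma colored_edges_aux (colour : String) :
    ∀ (chromosomes : List (List Int)) (acc : List (Int × Int × String)),
      (∀ c ∈ chromosomes, c ≠ []) →
      chromosomes.foldl
        (fun col_edges chromosome =>
          let nodes := Chromosome_to_Cycle chromosome
          ((PySem.List.pyRange 1 ((nodes.length : Int) - 1) 2).foldl
            (fun a i => a ++ [(PySem.List.pyGetD nodes i 0, PySem.List.pyGetD nodes (i + 1) 0, colour)])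
            col_edges)
          ++ [(PySem.List.pyGetD nodes (-1) 0, PySem.List.pyGetD nodes 0 0, colour)]) acc
      = acc ++ chromosomes.flatMap (pvChromEdges · colour) := by
  intro chromosomes
  induction chromosomes with
  | nil => intro acc _; simp
  | cons c cs ih =>
      intro acc hall
      simp only [List.foldl_cons, List.flatMap_cons]
      rw [colored_edges_body c (hall c (by simp)) colour acc]
      rw [ih (acc ++ pvChromEdges c colour) (fun x hx => hall x (List.mem_cons_of_mem _ hx))]
      simp [List.append_assoc]

lemma colored_edges_eq (chromosomes : List (List Int)) (colour : String)
    (h : ∀ c ∈ chromosomes, c ≠ []) :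
    Colored_Edges chromosomes colour = chromosomes.flatMap (pvChromEdges · colour) := by
  rw [Colored_Edges]
  simpa using colored_edges_aux colour chromosomes [] h

-- B's inner map is pvChromEdges (no nonemptiness needed: both are maps over range n)
lemma bmap_eq (c : List Int) (colour : String) :
    (List.range c.length).map (fun j =>
        let g := c.getD j 0
        let h := c.getD ((j + 1) % c.length) 0
        ((if g > 0 then 2*g else -2*g - 1), (if h > 0 then 2*h - 1 else -2*h), colour))
      = pvChromEdges c colour := by
  rw [pvChromEdges]
  apply List.map_congr_left
  intro j _
  simp only [ends_fst, ends_snd]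

-- A's per-edge update (membership test then append-in-place) as two modify steps
def pvStep (adj : PySem.Dict Int (List (Int × String))) (e : Int × Int × String) :
    PySem.Dict Int (List (Int × String)) :=
  (adj.modify e.1 [] (· ++ [(e.2.1, e.2.2)])).modify e.2.1 [] (· ++ [(e.1, e.2.2)])

lemma modify_eq (adj : PySem.Dict Int (List (Int × String))) (u : Int) (x : Int × String) :
    (match adj.get? u with
     | none => adj.insert u [x]
     | some l => adj.insert u (l ++ [x])) = adj.modify u [] (· ++ [x]) := by
  cases h : adj.get? u with
  | none => simp [PySem.Dict.modify, PySem.Dict.getD_eq_get?_getD, h]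
  | some l => simp [PySem.Dict.modify, PySem.Dict.getD_eq_get?_getD, h]

lemma step_eq (adj : PySem.Dict Int (List (Int × String))) (e : Int × Int × String) :
    (match (match adj.get? e.1 with
            | none => adj.insert e.1 [(e.2.1, e.2.2)]
            | some l => adj.insert e.1 (l ++ [(e.2.1, e.2.2)])).get? e.2.1 with
     | none => (match adj.get? e.1 with
            | none => adj.insert e.1 [(e.2.1, e.2.2)]
            | some l => adj.insert e.1 (l ++ [(e.2.1, e.2.2)])).insert e.2.1 [(e.1, e.2.2)]
     | some l => (match adj.get? e.1 with
            | none => adj.insert e.1 [(e.2.1, e.2.2)]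
            | some l' => adj.insert e.1 (l' ++ [(e.2.1, e.2.2)])).insert e.2.1 (l ++ [(e.1, e.2.2)]))
    = pvStep adj e := by
  rw [pvStep, ← modify_eq, ← modify_eq]

lemma a_dict_eq (edges : List (Int × Int × String)) (d : PySem.Dict Int (List (Int × String))) :
    edges.foldl
      (fun (adj : PySem.Dict Int (List (Int × String))) edge =>
        let adj :=
          match adj.get? edge.1 with
          | none => adj.insert edge.1 [(edge.2.1, edge.2.2)]
          | some l => adj.insert edge.1 (l ++ [(edge.2.1, edge.2.2)])
        match adj.get? edge.2.1 with
        | none => adj.insert edge.2.1 [(edge.1, edge.2.2)]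
        | some l => adj.insert edge.2.1 (l ++ [(edge.1, edge.2.2)])) d
    = edges.foldl pvStep d := by
  apply PySem.List.foldl_congr_mem
  intro acc x _
  exact step_eq acc x

-- each edge, as its two (key, entry) append events
def pvEvents (edges : List (Int × Int × String)) : List (Int × (Int × String)) :=
  edges.flatMap (fun e => [(e.1, (e.2.1, e.2.2)), (e.2.1, (e.1, e.2.2))])

lemma foldl_flatMap_fold {α β γ : Type} (l : List α) (g : α → List β)
    (f : γ → β → γ) (init : γ) :
    (l.flatMap g).foldl f init = l.foldl (fun acc x => (g x).foldl f acc) init := by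
  induction l generalizing init with
  | nil => rfl
  | cons x xs ih => simp [List.flatMap_cons, List.foldl_append, ih]

lemma fold_pvStep_eq_events (edges : List (Int × Int × String))
    (d : PySem.Dict Int (List (Int × String))) :
    edges.foldl pvStep d
      = (pvEvents edges).foldl (fun d p => d.modify p.1 [] (· ++ [p.2])) d := by
  rw [pvEvents, foldl_flatMap_fold]
  rfl

lemma events_keys (edges : List (Int × Int × String)) :
    (pvEvents edges).map Prod.fst = edges.flatMap (fun e => [e.1, e.2.1]) := by
  induction edges with
  | nil => rfl
  | cons e es ih => simp [pvEvents, List.flatMap_cons] at ih ⊢; exact ih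

lemma events_filter (edges : List (Int × Int × String)) (k : Int) :
    edges.flatMap (fun e =>
        (if e.1 == k then [(e.2.1, e.2.2)] else []) ++ (if e.2.1 == k then [(e.1, e.2.2)] else []))
      = ((pvEvents edges).filter (fun p => p.1 == k)).map (·.2) := by
  induction edges with
  | nil => rfl
  | cons e es ih =>
      simp only [pvEvents, List.flatMap_cons] at ih ⊢
      rw [List.filter_append, List.map_append, ← ih]
      refine congrArg₂ (· ++ ·) ?_ rfl
      simp only [List.filter_cons, List.filter_nil]
      split <;> split <;> rfl

-- A's dict fold, characterised as B's group-by over the same edge list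
lemma main_eq (E : List (Int × Int × String)) :
    (E.foldl pvStep PySem.Dict.empty).items
      = (PySem.Set.ofList (E.flatMap (fun e => [e.1, e.2.1]))).map
          (fun k => (k, E.flatMap (fun e =>
            (if e.1 == k then [(e.2.1, e.2.2)] else [])
              ++ (if e.2.1 == k then [(e.1, e.2.2)] else [])))) := by
  rw [fold_pvStep_eq_events]
  have hnd : ((pvEvents E).foldl (fun d p => d.modify p.1 [] (· ++ [p.2]))
      (PySem.Dict.empty : PySem.Dict Int (List (Int × String)))).keys.Nodup :=
    PySem.Dict.nodup_keys_foldl_modify_key _ _ _ _ _ PySem.Dict.nodup_keys_empty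
  rw [PySem.Dict.items_eq_map_keys _ hnd []]
  rw [PySem.Dict.keys_foldl_modify_key]
  have hkeys : PySem.Set.update (PySem.Dict.empty :
      PySem.Dict Int (List (Int × String))).keys ((pvEvents E).map Prod.fst)
      = PySem.Set.ofList (E.flatMap (fun e => [e.1, e.2.1])) := by
    rw [events_keys]
    rfl
  rw [hkeys]
  apply List.map_congr_left
  intro k _
  rw [PySem.Dict.getD_foldl_modify_append, events_filter]
  simp [PySem.Dict.getD_empty]

-- ===== VERDICT (by name: the statement is the Claim_ definition above) =====
theorem Breakpoint_graph_spec : Claim_equal_Breakpoint_graph := by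
  intro genomes _ hpre
  obtain ⟨hlen2, hchrom⟩ := hpre
  unfold Spec_Breakpoint_graph
  rcases genomes with _ | ⟨g1, _ | ⟨g2, _ | ⟨g3, rest⟩⟩⟩
  · rfl
  · have h1 : ∀ c ∈ g1, c ≠ [] := fun c hc => hchrom g1 (by simp) c hc
    have hen : PySem.List.enumerate [g1] 0 = [((0 : Int), g1)] := rfl
    simp only [Breakpoint_graph, Breakpoint_graph_alt, hen,
      List.foldl_cons, List.foldl_nil, List.nil_append,
      show PySem.List.pyGetD ["blue", "red"] (-1) "" = "red" from rfl,
      show PySem.List.pyGetD ["red", "blue"] (0 : Int) "" = "red" from rfl]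
    rw [a_dict_eq, colored_edges_eq g1 "red" h1, main_eq,
      PySem.List.foldl_append_eq_flatMap, List.nil_append]
    have : g1.flatMap (fun chrom => (List.range chrom.length).map (fun j =>
        let g := chrom.getD j 0
        let h := chrom.getD ((j + 1) % chrom.length) 0
        ((if g > 0 then 2*g else -2*g - 1), (if h > 0 then 2*h - 1 else -2*h), "red")))
        = g1.flatMap (pvChromEdges · "red") := by
      apply List.flatMap_congr
      intro c _
      exact bmap_eq c "red"
    rw [this]
  · have h1 : ∀ c ∈ g1, c ≠ [] := fun c hc => hchrom g1 (by simp) c hc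
    have h2 : ∀ c ∈ g2, c ≠ [] := fun c hc => hchrom g2 (by simp) c hc
    have hen : PySem.List.enumerate [g1, g2] 0 = [((0 : Int), g1), ((1 : Int), g2)] := rfl
    simp only [Breakpoint_graph, Breakpoint_graph_alt, hen,
      List.foldl_cons, List.foldl_nil, List.nil_append,
      show PySem.List.pyGetD ["blue", "red"] (-1) "" = "red" from rfl,
      show (["blue", "red"] : List String).dropLast = ["blue"] from rfl,
      show PySem.List.pyGetD ["blue"] (-1) "" = "blue" from rfl,
      show PySem.List.pyGetD ["red", "blue"] (0 : Int) "" = "red" from rfl,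
      show PySem.List.pyGetD ["red", "blue"] (1 : Int) "" = "blue" from rfl]
    rw [a_dict_eq, colored_edges_eq g1 "red" h1, colored_edges_eq g2 "blue" h2, main_eq,
      PySem.List.foldl_append_eq_flatMap, PySem.List.foldl_append_eq_flatMap, List.nil_append]
    have e1 : g1.flatMap (fun chrom => (List.range chrom.length).map (fun j =>
        let g := chrom.getD j 0
        let h := chrom.getD ((j + 1) % chrom.length) 0
        ((if g > 0 then 2*g else -2*g - 1), (if h > 0 then 2*h - 1 else -2*h), "red")))
        = g1.flatMap (pvChromEdges · "red") := by
      apply List.flatMap_congr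
      intro c _
      exact bmap_eq c "red"
    have e2 : g2.flatMap (fun chrom => (List.range chrom.length).map (fun j =>
        let g := chrom.getD j 0
        let h := chrom.getD ((j + 1) % chrom.length) 0
        ((if g > 0 then 2*g else -2*g - 1), (if h > 0 then 2*h - 1 else -2*h), "blue")))
        = g2.flatMap (pvChromEdges · "blue") := by
      apply List.flatMap_congr
      intro c _
      exact bmap_eq c "blue"
    rw [e1, e2]
  · exfalso
    simp only [List.length_cons] at hlen2
    omega
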